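-- pv_equiv track=rewrite | github.com/ArturHairullin/SHARE_ML_HW | code.py | max_time
-- ===== SOURCE A (Python) =====
-- def max_time(a):
--     m = 0
--     tmp = 0
--     for s in a:
--         if s[0] > 40:
--             tmp+=s[1]
--         else:
--             if tmp > m:
--                 m = tmp
--             tmp = 0
--     if tmp > m:
--         m = tmp
--     return m
-- ===== SOURCE B (Python) =====
-- def max_time(a):
--     # group-then-reduce: collect the sum of each maximal run of qualifying
--     # elements, then take the max together with the 0 baseline
--     sums = []
--     i = 0
--     n = len(a)
--     while i < n:
--         if a[i][0] > 40:
--             t = 0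
--             j = i
--             while j < n and a[j][0] > 40:
--                 t += a[j][1]
--                 j += 1
--             sums.append(t)
--             i = j
--         else:
--             i += 1
--     return max([0] + sums)
-- ===== Notes on version B (the rewrite author's own statement) =====
-- stated objective: alternative
-- what changed: Replaces A's single pass with one running accumulator and a best-so-far register by a two-stage group-then-reduce: first collect the sum of each maximal run of elements with s[0] > 40, then return the max of those run-sums together with the 0 baseline.
import Mathlib
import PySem

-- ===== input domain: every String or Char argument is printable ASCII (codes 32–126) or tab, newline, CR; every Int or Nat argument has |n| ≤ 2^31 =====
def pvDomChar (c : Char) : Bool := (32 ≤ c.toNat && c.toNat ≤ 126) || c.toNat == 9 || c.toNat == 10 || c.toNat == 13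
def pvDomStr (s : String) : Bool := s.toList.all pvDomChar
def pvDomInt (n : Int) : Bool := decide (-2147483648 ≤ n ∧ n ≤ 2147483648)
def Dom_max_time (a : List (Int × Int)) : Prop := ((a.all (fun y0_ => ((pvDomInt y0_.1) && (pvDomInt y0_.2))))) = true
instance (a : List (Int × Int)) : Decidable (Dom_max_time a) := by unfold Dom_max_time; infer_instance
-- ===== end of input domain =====

-- B replaces A's single running-accumulator pass by a group-then-reduce two-stage
-- computation (sum each maximal qualifying run, then max with the 0 baseline); same cost.

-- ===== PORT A =====
-- the for-loop of A over state (m, tmp), plus the trailing 'if tmp > m' check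
def pvLoopA : Int → Int → List (Int × Int) → Int
  | m, tmp, [] => if tmp > m then tmp else m
  | m, tmp, s :: rest =>
      if s.1 > 40 then pvLoopA m (tmp + s.2) rest
      else pvLoopA (if tmp > m then tmp else m) 0 rest

def max_time (a : List (Int × Int)) : Int := pvLoopA 0 0 a

-- ===== PORT B =====
-- stage 1 of Source B: the sums of the maximal runs of elements with s[0] > 40
def pvRunSums : List (Int × Int) → List Int
  | [] => []
  | x :: xs =>
      if x.1 > 40 then
        (((x :: xs.takeWhile (fun s => decide (s.1 > 40))).map Prod.snd).sum)
          :: pvRunSums (xs.dropWhile (fun s => decide (s.1 > 40)))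
      else pvRunSums xs
termination_by l => l.length
decreasing_by
  · have := List.length_dropWhile_le (fun s : Int × Int => decide (s.1 > 40)) xs
    simp; omega
  · simp

-- stage 2 of Source B: max([0] + sums)
def max_time_alt (a : List (Int × Int)) : Int := (pvRunSums a).foldl max 0

-- ===== PRECONDITION & SPEC =====
def Spec_max_time (a : List (Int × Int)) (out : Int) : Prop := out = max_time_alt a
instance (a : List (Int × Int)) (out : Int) : Decidable (Spec_max_time a out) := by unfold Spec_max_time; infer_instance

-- ===== CLAIM (what is proved, stated in full; the proofs are below) =====
def Claim_equal_max_time : Prop := ∀ (a : List (Int × Int)), Dom_max_time a → Spec_max_time a (max_time a)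

-- ===== LEMMAS AND PROOFS =====

theorem pv_foldl_max_shift (L : List Int) (x y : Int) :
    L.foldl max (max x y) = max x (L.foldl max y) := by
  induction L generalizing y with
  | nil => simp
  | cons z zs ih =>
      simp only [List.foldl_cons]
      rw [max_assoc, ih]

theorem pv_loopA_trueRun (g rest : List (Int × Int)) (h : ∀ s ∈ g, s.1 > 40)
    (m tmp : Int) :
    pvLoopA m tmp (g ++ rest) = pvLoopA m (tmp + (g.map Prod.snd).sum) rest := by
  induction g generalizing tmp with
  | nil => simp
  | cons x xs ih =>
      have hx : x.1 > 40 := h x (by simp)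
      simp only [List.cons_append, pvLoopA, if_pos hx]
      rw [ih (fun s hs => h s (by simp [hs]))]
      congr 1
      simp
      ring

theorem pv_foldl_max_ge_init (L : List Int) (c : Int) : c ≤ L.foldl max c := by
  induction L generalizing c with
  | nil => simp
  | cons z zs ih => exact le_trans (le_max_left c z) (ih _)

theorem pv_main (a : List (Int × Int)) (m : Int) (hm : 0 ≤ m) :
    pvLoopA m 0 a = max m ((pvRunSums a).foldl max 0) := by
  induction a using pvRunSums.induct generalizing m with
  | case1 =>
      simp only [pvLoopA, pvRunSums, List.foldl_nil]
      omega
  | case2 x xs hx ih =>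
      -- x.1 > 40 : a maximal true run x :: g, then rest
      set g := xs.takeWhile (fun s => decide (s.1 > 40)) with hg
      set rest := xs.dropWhile (fun s => decide (s.1 > 40)) with hrest
      have hsplit : xs = g ++ rest := (List.takeWhile_append_dropWhile).symm
      have hgall : ∀ s ∈ g, s.1 > 40 := by
        intro s hs
        have := List.mem_takeWhile_imp (hg ▸ hs)
        simpa using this
      have hhead : ∀ y ys, rest = y :: ys → ¬ y.1 > 40 := by
        intro y ys h0
        have h1 := List.head?_dropWhile_not (fun s : Int × Int => decide (s.1 > 40)) xs
        rw [← hrest, h0] at h1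
        simpa using h1
      set S : Int := ((x :: g).map Prod.snd).sum with hS
      have hloop : pvLoopA m 0 (x :: xs) = pvLoopA m S rest := by
        conv_lhs => rw [hsplit]
        simp only [pvLoopA, if_pos hx]
        rw [pv_loopA_trueRun g rest hgall m (0 + x.2)]
        congr 1
        simp [hS]
      have hsums : pvRunSums (x :: xs) = S :: pvRunSums rest := by
        rw [pvRunSums]
        simp [hx, hS, hg, hrest]
      rw [hloop, hsums]
      have hfold : (S :: pvRunSums rest).foldl max 0 = max S ((pvRunSums rest).foldl max 0) := by
        simp only [List.foldl_cons]
        rw [max_comm 0 S, pv_foldl_max_shift]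
      rw [hfold]
      clear_value g rest S
      rcases rest with _ | ⟨y, ys⟩
      · simp only [pvLoopA, pvRunSums, List.foldl_nil]
        omega
      · have hy : ¬ y.1 > 40 := hhead y ys rfl
        have hm' : 0 ≤ max m S := le_trans hm (le_max_left _ _)
        have h1 : pvLoopA m S (y :: ys) = pvLoopA (max m S) 0 ys := by
          simp only [pvLoopA, if_neg hy]
          congr 1
          omega
        have h1' : pvLoopA (max m S) 0 (y :: ys) = pvLoopA (max m S) 0 ys := by
          simp only [pvLoopA, if_neg hy]
          congr 1
          omega
        have hih := ih (max m S) hm'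
        rw [h1, ← h1', hih]
        omega
  | case3 x xs hx ih =>
      have h1 : pvLoopA m 0 (x :: xs) = pvLoopA m 0 xs := by
        simp only [pvLoopA, if_neg hx]
        congr 1
        omega
      have h2 : pvRunSums (x :: xs) = pvRunSums xs := by
        rw [pvRunSums]; simp [hx]
      rw [h1, h2, ih m hm]

-- ===== VERDICT (by name: the statement is the Claim_ definition above) =====
theorem max_time_spec : Claim_equal_max_time := by
  intro a _
  unfold Spec_max_time max_time max_time_alt
  rw [pv_main a 0 le_rfl]
  have := pv_foldl_max_ge_init (pvRunSums a) 0
  omega
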